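-- pv_equiv track=rewrite | github.com/dmshirochenko/algorithmic_trainings | yandex_algo_5_0/part_2/J. Два прямоугольника.py | adjust_rectangle_right_over_bottom
-- ===== SOURCE A (Python) =====
-- def adjust_rectangle_right_over_bottom(grid, top, left, initial_bottom, initial_right):
--     for right in range(initial_right, left, -1):
--         for bottom in range(initial_bottom, top, -1):
--             valid = True
--             for r in range(top, bottom):
--                 for c in range(left, right):
--                     if grid[r][c] not in ("a", "#", "b"):
--                         valid = False
--                         break
--                 if not valid:
--                     break
--             if valid:
--                 return True, bottom, right
--
--     return False, initial_bottom, initial_right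
-- ===== SOURCE B (Python) =====
-- def adjust_rectangle_right_over_bottom(grid, top, left, initial_bottom, initial_right):
--     if initial_right <= left or initial_bottom <= top:
--         return False, initial_bottom, initial_right
--     allowed = ("a", "#", "b")
--     # The widest usable right edge is bounded by the first bad cell in the top row.
--     right = initial_right
--     for c in range(left, initial_right):
--         if grid[top][c] not in allowed:
--             right = c
--             break
--     if right <= left:
--         return False, initial_bottom, initial_right
--     # The lowest usable bottom edge is bounded by the first bad row below the top row.
--     bottom = initial_bottom
--     for r in range(top + 1, initial_bottom):
--         if any(grid[r][c] not in allowed for c in range(left, right)):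
--             bottom = r
--             break
--     return True, bottom, right
-- ===== Notes on version B (the rewrite author's own statement) =====
-- stated objective: alternative
-- what changed: Instead of testing every (right,bottom) candidate with a full rectangle re-scan, B scans the top row once to find the first disallowed column (which bounds the widest valid right edge) and then scans the remaining rows once to find the first dirty row (which bounds the lowest valid bottom edge).
-- outside the precondition, e.g. on adjust_rectangle_right_over_bottom([['x']], 0, 0, 2, 1): A returns (False, 2, 1), B returns (False, 2, 1)
import Mathlib
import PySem

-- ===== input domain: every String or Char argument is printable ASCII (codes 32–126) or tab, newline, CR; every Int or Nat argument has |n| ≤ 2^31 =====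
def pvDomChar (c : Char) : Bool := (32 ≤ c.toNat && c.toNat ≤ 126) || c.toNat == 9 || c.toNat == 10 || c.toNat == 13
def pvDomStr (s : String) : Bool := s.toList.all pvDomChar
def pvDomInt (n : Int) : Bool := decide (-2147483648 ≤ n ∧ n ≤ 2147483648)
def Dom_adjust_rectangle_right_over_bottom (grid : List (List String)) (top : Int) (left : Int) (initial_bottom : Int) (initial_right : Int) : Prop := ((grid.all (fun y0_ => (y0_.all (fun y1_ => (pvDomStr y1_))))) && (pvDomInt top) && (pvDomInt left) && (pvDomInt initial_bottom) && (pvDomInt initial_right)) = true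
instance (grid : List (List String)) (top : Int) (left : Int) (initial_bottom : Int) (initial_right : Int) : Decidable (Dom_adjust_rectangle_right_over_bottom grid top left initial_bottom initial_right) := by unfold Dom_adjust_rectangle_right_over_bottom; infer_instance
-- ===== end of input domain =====

-- B replaces A's scan of (right, bottom) candidate pairs (each re-checked by a rectangle scan)
-- with one pass over the top row (first bad cell bounds the right edge) and one pass over the
-- remaining rows (first dirty row bounds the bottom edge); objective: alternative algorithm.

-- ===== PORT A =====
-- shared cell access: grid[r][c] (the defaults are only reachable outside Pre_) and the '"…" in ("a","#","b")' test
def pvCell (grid : List (List String)) (r c : Int) : String :=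
  PySem.List.pyGetD (PySem.List.pyGetD grid r []) c ""

def pvAllowed (s : String) : Bool := s == "a" || s == "#" || s == "b"

def adjust_rectangle_right_over_bottom (grid : List (List String)) (top : Int) (left : Int) (initial_bottom : Int) (initial_right : Int) : Bool × Int × Int :=
  match (PySem.List.pyRange initial_right left (-1)).findSome? (fun right =>
      ((PySem.List.pyRange initial_bottom top (-1)).find? (fun bottom =>
        (PySem.List.pyRange top bottom 1).all (fun r =>
          (PySem.List.pyRange left right 1).all (fun c =>
            pvAllowed (pvCell grid r c))))).map (fun bottom => (bottom, right))) with
  | some (bottom, right) => (true, bottom, right)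
  | none => (false, initial_bottom, initial_right)

-- ===== PORT B =====
def adjust_rectangle_right_over_bottom_alt (grid : List (List String)) (top : Int) (left : Int) (initial_bottom : Int) (initial_right : Int) : Bool × Int × Int :=
  if initial_right ≤ left ∨ initial_bottom ≤ top then (false, initial_bottom, initial_right)
  else
    let right : Int :=
      match (PySem.List.pyRange left initial_right 1).find? (fun c => !pvAllowed (pvCell grid top c)) with
      | some c => c
      | none => initial_right
    if right ≤ left then (false, initial_bottom, initial_right)
    else
      let bottom : Int :=
        match (PySem.List.pyRange (top + 1) initial_bottom 1).find? (fun r =>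
            (PySem.List.pyRange left right 1).any (fun c => !pvAllowed (pvCell grid r c))) with
        | some r => r
        | none => initial_bottom
      (true, bottom, right)

-- ===== PRECONDITION & SPEC =====
-- Pre_: either the candidate ranges are empty (A touches no cell), or every index of the scanned
-- rectangle is a valid (possibly negative, Python-wrapping) index in every row. It excludes the
-- inputs on which A raises IndexError, and conservatively also a few inputs on which an early
-- break at a disallowed cell stops A just before an out-of-range access would have raised.
def Pre_adjust_rectangle_right_over_bottom (grid : List (List String)) (top : Int) (left : Int) (initial_bottom : Int) (initial_right : Int) : Prop :=
  (initial_right ≤ left ∨ initial_bottom ≤ top) ∨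
  (-(grid.length : Int) ≤ top ∧ initial_bottom ≤ (grid.length : Int) ∧
   ∀ row ∈ grid, -(row.length : Int) ≤ left ∧ initial_right ≤ (row.length : Int))
instance (grid : List (List String)) (top : Int) (left : Int) (initial_bottom : Int) (initial_right : Int) : Decidable (Pre_adjust_rectangle_right_over_bottom grid top left initial_bottom initial_right) := by unfold Pre_adjust_rectangle_right_over_bottom; infer_instance

def pvWitness_adjust_rectangle_right_over_bottom : List (List String) × Int × Int × Int × Int :=
  ([["a", "b"], ["x", "#"]], 0, 0, 2, 2)

def Spec_adjust_rectangle_right_over_bottom (grid : List (List String)) (top : Int) (left : Int) (initial_bottom : Int) (initial_right : Int) (out : Bool × Int × Int) : Prop := out = adjust_rectangle_right_over_bottom_alt grid top left initial_bottom initial_right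
instance (grid : List (List String)) (top : Int) (left : Int) (initial_bottom : Int) (initial_right : Int) (out : Bool × Int × Int) : Decidable (Spec_adjust_rectangle_right_over_bottom grid top left initial_bottom initial_right out) := by unfold Spec_adjust_rectangle_right_over_bottom; infer_instance

-- ===== CLAIM (what is proved, stated in full; the proofs are below) =====
def Claim_equal_adjust_rectangle_right_over_bottom : Prop := ∀ (grid : List (List String)) (top : Int) (left : Int) (initial_bottom : Int) (initial_right : Int), Dom_adjust_rectangle_right_over_bottom grid top left initial_bottom initial_right → Pre_adjust_rectangle_right_over_bottom grid top left initial_bottom initial_right → Spec_adjust_rectangle_right_over_bottom grid top left initial_bottom initial_right (adjust_rectangle_right_over_bottom grid top left initial_bottom initial_right)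

-- ===== LEMMAS AND PROOFS =====

-- findSome? as find?-then-bind
theorem pv_findSome?_eq_find?_bind {α β : Type} (g : α → Option β) (l : List α) :
    l.findSome? g = (l.find? (fun x => (g x).isSome)).bind g := by
  induction l with
  | nil => simp
  | cons a t ih =>
    by_cases h : (g a).isSome
    · rcases Option.isSome_iff_exists.mp h with ⟨b, hb⟩
      simp [hb]
    · rw [Option.not_isSome_iff_eq_none] at h
      simp [h, ih]

-- Descending search for the largest b in (lo, hi] whose prefix [lo, b) is all-good, expressed
-- through the ascending search for the first bad element of [lo, hi).
theorem pv_find_desc_all_aux (p : Int → Bool) (lo : Int) (n : Nat) :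
    (PySem.List.pyRange (lo + n) lo (-1)).find? (fun b => (PySem.List.pyRange lo b 1).all p)
    = (match (PySem.List.pyRange lo (lo + n) 1).find? (fun c => !p c) with
       | some c => if lo < c then some c else none
       | none => if lo < lo + n then some (lo + n) else none) := by
  induction n with
  | zero =>
    simp [PySem.List.pyRange_neg_one_eq_nil le_rfl, PySem.List.pyRange_one_eq_nil le_rfl]
  | succ n ih =>
    have hle : lo ≤ lo + (n : Int) := by omega
    have hlt : lo < lo + (n : Int) + 1 := by omega
    push_cast
    rw [show lo + ((n : Int) + 1) = lo + (n : Int) + 1 from by ring]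
    rw [PySem.List.pyRange_neg_one_cons (by omega : lo < lo + (n : Int) + 1), List.find?_cons]
    rw [show lo + (n : Int) + 1 - 1 = lo + (n : Int) from by ring]
    rw [PySem.List.pyRange_one_succ_right hle]
    rw [List.find?_append]
    cases hfind : (PySem.List.pyRange lo (lo + (n : Int)) 1).find? (fun c => !p c) with
    | some c =>
      have hc : (!p c) = true := List.find?_some (p := fun c => !p c) hfind
      have hmem : c ∈ PySem.List.pyRange lo (lo + (n : Int)) 1 := List.mem_of_find?_eq_some hfind
      have hall : ((PySem.List.pyRange lo (lo + (n : Int)) 1 ++ [lo + (n : Int)]).all p) = false := by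
        simp only [List.all_append, Bool.and_eq_false_iff]
        left
        exact List.all_eq_false.mpr ⟨c, hmem, by simp_all⟩
      rw [hall]
      rw [ih, hfind]
      simp
    | none =>
      cases hp : p (lo + (n : Int)) with
      | false =>
        have hall : ((PySem.List.pyRange lo (lo + (n : Int)) 1 ++ [lo + (n : Int)]).all p) = false := by
          simp [List.all_append, hp]
        rw [hall]
        rw [ih, hfind]
        simp [hp, hle.lt_iff_ne]
      | true =>
        have hgood : ∀ c ∈ PySem.List.pyRange lo (lo + (n : Int)) 1, p c = true := by
          intro c hc
          have := List.find?_eq_none.mp hfind c hc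
          simpa using this
        have hall : ((PySem.List.pyRange lo (lo + (n : Int)) 1 ++ [lo + (n : Int)]).all p) = true := by
          simp only [List.all_append, List.all_eq_true, Bool.and_eq_true]
          exact ⟨hgood, by simp [hp]⟩
        rw [hall]
        simp [hp, hlt]

theorem pv_find_desc_all (p : Int → Bool) (lo hi : Int) :
    (PySem.List.pyRange hi lo (-1)).find? (fun b => (PySem.List.pyRange lo b 1).all p)
    = (match (PySem.List.pyRange lo hi 1).find? (fun c => !p c) with
       | some c => if lo < c then some c else none
       | none => if lo < hi then some hi else none) := by
  rcases le_or_gt lo hi with h | h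
  · have : hi = lo + ((hi - lo).toNat : Int) := by omega
    rw [this]
    exact pv_find_desc_all_aux p lo (hi - lo).toNat
  · rw [PySem.List.pyRange_neg_one_eq_nil (le_of_lt h), PySem.List.pyRange_one_eq_nil (le_of_lt h)]
    simp [show ¬ lo < hi by omega]

-- everything strictly before the first element failing p satisfies p
theorem pv_find_prefix_all_aux (p : Int → Bool) :
    ∀ (n : Nat) (lo c : Int), (PySem.List.pyRange lo (lo + n) 1).find? (fun x => !p x) = some c →
      (PySem.List.pyRange lo c 1).all p = true := by
  intro n
  induction n with
  | zero =>
    intro lo c h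
    rw [PySem.List.pyRange_one_eq_nil (by omega)] at h
    simp at h
  | succ n ih =>
    intro lo c h
    have hcast : lo + ((n : Nat) + 1 : Nat) = (lo + 1) + (n : Int) := by push_cast; ring
    rw [hcast, PySem.List.pyRange_one_cons (by omega), List.find?_cons] at h
    cases hp : p lo with
    | false =>
      rw [hp] at h
      simp at h
      subst h
      rw [PySem.List.pyRange_one_eq_nil le_rfl]
      rfl
    | true =>
      rw [hp] at h
      simp only [Bool.not_true] at h
      have hc := ih (lo + 1) c h
      have hmem := List.mem_of_find?_eq_some h
      have hlt : lo < c := by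
        have := (PySem.List.mem_pyRange_one.mp hmem).1
        omega
      rw [PySem.List.pyRange_one_cons hlt, List.all_cons, hp, hc]
      rfl

theorem pv_find_prefix_all (p : Int → Bool) (lo hi c : Int)
    (h : (PySem.List.pyRange lo hi 1).find? (fun x => !p x) = some c) :
    (PySem.List.pyRange lo c 1).all p = true := by
  rcases le_or_gt lo hi with hle | hgt
  · have : hi = lo + ((hi - lo).toNat : Int) := by omega
    rw [this] at h
    exact pv_find_prefix_all_aux p (hi - lo).toNat lo c h
  · rw [PySem.List.pyRange_one_eq_nil (le_of_lt hgt)] at h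
    simp at h

-- find? = none means everything satisfies p
theorem pv_find_none_all (l : List Int) (p : Int → Bool)
    (h : l.find? (fun x => !p x) = none) : l.all p = true := by
  simp only [List.all_eq_true]
  intro x hx
  have := List.find?_eq_none.mp h x hx
  simpa using this

theorem pv_any_not (l : List Int) (p : Int → Bool) : (l.any fun x => !p x) = !l.all p := by
  induction l with
  | nil => simp
  | cons a t ih => simp [List.any_cons, List.all_cons, ih, Bool.not_and]

-- Characterisation of A's inner loop (the search for a valid bottom at a fixed right edge).
theorem pv_inner_char (grid : List (List String)) (top left ib right : Int) (h : top < ib) :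
    ((PySem.List.pyRange ib top (-1)).find? (fun bottom =>
        (PySem.List.pyRange top bottom 1).all (fun r =>
          (PySem.List.pyRange left right 1).all (fun c => pvAllowed (pvCell grid r c)))))
    = (if (PySem.List.pyRange left right 1).all (fun c => pvAllowed (pvCell grid top c)) then
        some (match (PySem.List.pyRange (top + 1) ib 1).find? (fun r =>
                !(PySem.List.pyRange left right 1).all (fun c => pvAllowed (pvCell grid r c))) with
              | some r => r
              | none => ib)
      else none) := by
  rw [pv_find_desc_all (fun r => (PySem.List.pyRange left right 1).all (fun c => pvAllowed (pvCell grid r c))) top ib]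
  rw [PySem.List.pyRange_one_cons h, List.find?_cons]
  cases htop : (PySem.List.pyRange left right 1).all (fun c => pvAllowed (pvCell grid top c)) with
  | false =>
    simp
  | true =>
    simp only [Bool.not_true, if_pos]
    cases hrest : (PySem.List.pyRange (top + 1) ib 1).find? (fun r =>
        !(PySem.List.pyRange left right 1).all (fun c => pvAllowed (pvCell grid r c))) with
    | some r =>
      have hmem := List.mem_of_find?_eq_some hrest
      have : top < r := by
        have := (PySem.List.mem_pyRange_one.mp hmem).1
        omega
      simp [this]
    | none =>
      simp [h]

-- The outer-loop predicate: the inner search succeeds iff the top row is clean up to `right`.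
theorem pv_outer_pred (grid : List (List String)) (top left ib : Int) (h : top < ib) (right : Int) :
    (((PySem.List.pyRange ib top (-1)).find? (fun bottom =>
        (PySem.List.pyRange top bottom 1).all (fun r =>
          (PySem.List.pyRange left right 1).all (fun c => pvAllowed (pvCell grid r c))))).map
      (fun bottom => (bottom, right))).isSome
    = (PySem.List.pyRange left right 1).all (fun c => pvAllowed (pvCell grid top c)) := by
  rw [pv_inner_char grid top left ib right h]
  cases htop : (PySem.List.pyRange left right 1).all (fun c => pvAllowed (pvCell grid top c)) <;> simp

-- ===== VERDICT (by name: the statement is the Claim_ definition above) =====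
theorem adjust_rectangle_right_over_bottom_spec : Claim_equal_adjust_rectangle_right_over_bottom := by
  intro grid top left ib ir _ _
  unfold Spec_adjust_rectangle_right_over_bottom
  unfold adjust_rectangle_right_over_bottom adjust_rectangle_right_over_bottom_alt
  rw [pv_findSome?_eq_find?_bind]
  by_cases hib : ib ≤ top
  · rw [PySem.List.pyRange_neg_one_eq_nil hib]
    simp [hib]
  · rw [not_le] at hib
    simp only [pv_outer_pred grid top left ib hib]
    rw [pv_find_desc_all (fun c => pvAllowed (pvCell grid top c)) left ir]
    cases hfind : (PySem.List.pyRange left ir 1).find? (fun c => !pvAllowed (pvCell grid top c)) with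
    | some c =>
      dsimp only
      have hmem := List.mem_of_find?_eq_some hfind
      obtain ⟨hc1, hc2⟩ := PySem.List.mem_pyRange_one.mp hmem
      by_cases hcl : left < c
      · -- A finds right = c
        have htopclean := pv_find_prefix_all (fun c => pvAllowed (pvCell grid top c)) left ir c hfind
        rw [if_pos hcl]
        simp only [Option.bind_some]
        rw [pv_inner_char grid top left ib c hib, if_pos htopclean]
        rw [if_neg (by omega : ¬ (ir ≤ left ∨ ib ≤ top))]
        simp only [pv_any_not]
        rw [if_neg (by omega : ¬ c ≤ left)]
        cases hrows : (PySem.List.pyRange (top + 1) ib 1).find? (fun r =>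
            !(PySem.List.pyRange left c 1).all (fun cc => pvAllowed (pvCell grid r cc))) <;> simp
      · rw [if_neg hcl]
        simp only [Option.bind_none]
        by_cases hirl : ir ≤ left
        · rw [if_pos (Or.inl hirl)]
        · rw [if_neg (by omega : ¬ (ir ≤ left ∨ ib ≤ top))]
          rw [if_pos (by omega : c ≤ left)]
    | none =>
      dsimp only
      by_cases hirl : left < ir
      · rw [if_pos hirl]
        simp only [Option.bind_some]
        have htopclean : (PySem.List.pyRange left ir 1).all (fun c => pvAllowed (pvCell grid top c)) = true :=
          pv_find_none_all _ _ hfind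
        rw [pv_inner_char grid top left ib ir hib, if_pos htopclean]
        rw [if_neg (by omega : ¬ (ir ≤ left ∨ ib ≤ top))]
        simp only [pv_any_not]
        rw [if_neg (by omega : ¬ ir ≤ left)]
        cases hrows : (PySem.List.pyRange (top + 1) ib 1).find? (fun r =>
            !(PySem.List.pyRange left ir 1).all (fun cc => pvAllowed (pvCell grid r cc))) <;> simp
      · rw [if_neg hirl]
        simp only [Option.bind_none]
        rw [if_pos (Or.inl (by omega : ir ≤ left))]
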